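-- pv_equiv track=rewrite | github.com/gofireflyio/firefly-workspace-importer | firefly-workspace-importer.py | project_id_for_work_dir
-- ===== SOURCE A (Python) =====
-- from typing import Any, Iterable, Optional
--
-- def format_work_dir(work_dir: str) -> str:
--     return work_dir if work_dir.startswith("/") else f"/{work_dir}"
--
-- def project_id_for_work_dir(work_dir: str, project_map: dict[str, str]) -> Optional[str]:
--     formatted = format_work_dir(work_dir.lstrip("/"))
--     if formatted in project_map:
--         return project_map[formatted]
--     if work_dir in project_map:
--         return project_map[work_dir]
--     best_id: Optional[str] = None
--     best_len = 0
--     for path, pid in project_map.items():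
--         if formatted.startswith(path) and len(path) > best_len:
--             best_id, best_len = pid, len(path)
--     return best_id
-- ===== SOURCE B (Python) =====
-- def format_work_dir(work_dir: str) -> str:
--     return work_dir if work_dir.startswith("/") else f"/{work_dir}"
--
-- def project_id_for_work_dir(work_dir, project_map):
--     formatted = format_work_dir(work_dir.lstrip("/"))
--     pid = project_map.get(formatted, project_map.get(work_dir))
--     if pid is not None:
--         return pid
--     # longest-prefix match: probe each proper prefix of formatted, longest first;
--     # no key longer than the longest key in the map can match, so start there
--     longest = max(map(len, project_map), default=0)
--     for i in range(min(len(formatted) - 1, longest), 0, -1):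
--         pid = project_map.get(formatted[:i])
--         if pid is not None:
--             return pid
--     return None
-- ===== Notes on version B (the rewrite author's own statement) =====
-- stated objective: alternative
-- what changed: Instead of scanning every map entry and keeping the best (longest) matching prefix key, B probes each prefix of the formatted path (no longer than the longest key) directly in the dict, longest first, returning on the first hit.
import Mathlib
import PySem

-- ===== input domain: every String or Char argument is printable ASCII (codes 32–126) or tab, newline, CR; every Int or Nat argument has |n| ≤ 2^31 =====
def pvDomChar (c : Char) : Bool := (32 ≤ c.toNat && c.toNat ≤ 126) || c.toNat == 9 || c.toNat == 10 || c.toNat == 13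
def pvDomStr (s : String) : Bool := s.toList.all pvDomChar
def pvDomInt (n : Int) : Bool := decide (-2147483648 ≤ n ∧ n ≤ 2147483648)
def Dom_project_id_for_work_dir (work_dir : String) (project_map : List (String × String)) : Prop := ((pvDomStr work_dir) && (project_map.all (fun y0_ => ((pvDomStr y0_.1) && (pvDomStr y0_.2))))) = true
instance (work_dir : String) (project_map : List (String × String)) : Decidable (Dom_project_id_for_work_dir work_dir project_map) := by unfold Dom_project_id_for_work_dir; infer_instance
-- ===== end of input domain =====

-- B replaces A's scan over all map entries by probing each prefix of the formatted path
-- (longest first, bounded by the longest key) directly in the map: a different algorithm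
-- whose loop runs over prefix lengths instead of over the map entries.


-- ===== PORT A =====
-- exact port of s.lstrip("/"): drop leading '/' characters
def pyLstripSlash (s : String) : String := String.ofList (s.toList.dropWhile (fun c => c == '/'))

def format_work_dir (work_dir : String) : String :=
  if PySem.Str.startswith work_dir "/" then work_dir else "/" ++ work_dir

-- one step of A's best-so-far loop over the dict items
def pidStep (formatted : String) (st : Option String × Int) (p : String × String) : Option String × Int :=
  if PySem.Str.startswith formatted p.1 && decide (st.2 < PySem.Str.len p.1) then (some p.2, PySem.Str.len p.1) else st

def project_id_for_work_dir (work_dir : String) (project_map : List (String × String)) : Option String :=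
  let formatted := format_work_dir (pyLstripSlash work_dir)
  match PySem.Dict.get? (PySem.Dict.mk project_map) formatted with
  | some v => some v
  | none =>
    match PySem.Dict.get? (PySem.Dict.mk project_map) work_dir with
    | some v => some v
    | none => (project_map.foldl (pidStep formatted) (none, 0)).1

-- ===== PORT B =====
-- B's descending loop: i is the prefix length currently tried (formatted[:i]), from len-1 down to 1
def altSearch (project_map : List (String × String)) (fl : List Char) : Nat → Option String
  | 0 => none
  | i + 1 =>
    match PySem.Dict.get? (PySem.Dict.mk project_map) (String.ofList (fl.take (i + 1))) with
    | some v => some v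
    | none => altSearch project_map fl i

-- longest key length in the map: max(map(len, project_map), default=0)
def maxKeyLen (project_map : List (String × String)) : Nat :=
  project_map.foldl (fun acc p => max acc p.1.toList.length) 0

def project_id_for_work_dir_alt (work_dir : String) (project_map : List (String × String)) : Option String :=
  let formatted := format_work_dir (pyLstripSlash work_dir)
  match (PySem.Dict.get? (PySem.Dict.mk project_map) formatted).or
        (PySem.Dict.get? (PySem.Dict.mk project_map) work_dir) with
  | some pid => some pid
  | none => altSearch project_map formatted.toList (min (formatted.toList.length - 1) (maxKeyLen project_map))

-- ===== PRECONDITION & SPEC =====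
def Spec_project_id_for_work_dir (work_dir : String) (project_map : List (String × String)) (out : Option String) : Prop := out = project_id_for_work_dir_alt work_dir project_map
instance (work_dir : String) (project_map : List (String × String)) (out : Option String) : Decidable (Spec_project_id_for_work_dir work_dir project_map out) := by unfold Spec_project_id_for_work_dir; infer_instance

-- ===== CLAIM (what is proved, stated in full; the proofs are below) =====
def Claim_equal_project_id_for_work_dir : Prop := ∀ (work_dir : String) (project_map : List (String × String)), Dom_project_id_for_work_dir work_dir project_map → Spec_project_id_for_work_dir work_dir project_map (project_id_for_work_dir work_dir project_map)

-- ===== LEMMAS AND PROOFS =====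

-- "prefix of length i is a key of the map" — the predicate whose greatest witness both loops compute
def probeB (m : List (String × String)) (fl : List Char) (i : Nat) : Bool :=
  decide (1 ≤ i) && (PySem.Dict.get? (PySem.Dict.mk m) (String.ofList (fl.take i))).isSome

theorem getq_isSome_iff (m : List (String × String)) (k : String) :
    (PySem.Dict.get? (PySem.Dict.mk m) k).isSome ↔ ∃ v, (k, v) ∈ m := by
  simp only [PySem.Dict.get?, Option.isSome_map, List.find?_isSome]
  constructor
  · rintro ⟨⟨a, b⟩, hm, h⟩
    exact ⟨b, by simpa using (by simpa using h : a = k) ▸ hm⟩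
  · rintro ⟨v, hv⟩
    exact ⟨(k, v), hv, by simp⟩

theorem key_eq_take (f k : String) (hs : PySem.Str.startswith f k = true) :
    k.toList = f.toList.take k.toList.length := by
  rw [PySem.Str.startswith_eq] at hs
  exact List.prefix_iff_eq_take.mp ((PySem.Chars.startswith_iff _ _).mp hs)

theorem startswith_take (f : String) (i : Nat) :
    PySem.Str.startswith f (String.ofList (f.toList.take i)) = true := by
  rw [PySem.Str.startswith_eq, String.toList_ofList]
  exact (PySem.Chars.startswith_iff _ _).mpr (List.take_prefix _ _)

theorem foldl_max_le (m : List (String × String)) (acc : Nat) :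
    acc ≤ m.foldl (fun a p => max a p.1.toList.length) acc := by
  induction m generalizing acc with
  | nil => exact le_rfl
  | cons q m ih => exact le_trans (Nat.le_max_left _ _) (ih (max acc q.1.toList.length))

theorem len_le_foldl_max (m : List (String × String)) (p : String × String) (acc : Nat)
    (hp : p ∈ m) : p.1.toList.length ≤ m.foldl (fun a q => max a q.1.toList.length) acc := by
  revert hp
  induction m generalizing acc with
  | nil => intro h; cases h
  | cons q m ih =>
    intro h
    rcases List.mem_cons.mp h with h | h
    · subst h
      exact le_trans (Nat.le_max_right acc _) (foldl_max_le m _)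
    · exact ih (max acc q.1.toList.length) h

theorem len_le_maxKeyLen (m : List (String × String)) (p : String × String) (hp : p ∈ m) :
    p.1.toList.length ≤ maxKeyLen m :=
  len_le_foldl_max m p 0 hp

theorem pidStep_skip (f : String) (st : Option String × Int) (p : String × String)
    (h : ¬(PySem.Str.startswith f p.1 = true ∧ st.2 < PySem.Str.len p.1)) :
    pidStep f st p = st := by
  unfold pidStep
  rw [if_neg]
  simpa only [Bool.and_eq_true, decide_eq_true_eq] using h

theorem pidStep_take (f : String) (st : Option String × Int) (p : String × String)
    (h1 : PySem.Str.startswith f p.1 = true) (h2 : st.2 < PySem.Str.len p.1) :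
    pidStep f st p = (some p.2, PySem.Str.len p.1) := by
  unfold pidStep
  rw [if_pos]
  simp only [Bool.and_eq_true, decide_eq_true_eq]
  exact ⟨h1, h2⟩

theorem foldA_stable (f : String) (m : List (String × String)) (b : Option String) (n : Int)
    (h : ∀ p ∈ m, PySem.Str.startswith f p.1 = true → PySem.Str.len p.1 ≤ n) :
    m.foldl (pidStep f) (b, n) = (b, n) := by
  induction m with
  | nil => rfl
  | cons p m ih =>
    have hstep : pidStep f (b, n) p = (b, n) := by
      apply pidStep_skip
      rintro ⟨hs, hlt⟩
      exact absurd (h p List.mem_cons_self hs) (by simpa using hlt)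
    rw [List.foldl_cons, hstep]
    exact ih (fun q hq => h q (List.mem_cons_of_mem _ hq))

theorem foldA_hit (f : String) (m : List (String × String)) (b : Option String) (n : Int)
    (L : Nat) (v : String)
    (hn : n < (L : Int)) (hL : L ≤ f.toList.length)
    (hget : PySem.Dict.get? (PySem.Dict.mk m) (String.ofList (f.toList.take L)) = some v)
    (hmax : ∀ p ∈ m, PySem.Str.startswith f p.1 = true → PySem.Str.len p.1 ≤ (L : Int)) :
    m.foldl (pidStep f) (b, n) = (some v, (L : Int)) := by
  induction m generalizing b n with
  | nil => simp [PySem.Dict.get?] at hget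
  | cons p m ih =>
    have htail : ∀ q ∈ m, PySem.Str.startswith f q.1 = true → PySem.Str.len q.1 ≤ (L : Int) :=
      fun q hq => hmax q (List.mem_cons_of_mem _ hq)
    by_cases he : p.1 = String.ofList (f.toList.take L)
    · -- the head pair carries the longest matching key
      have hv : p.2 = v := by
        rw [PySem.Dict.get?_mk_cons, if_pos (by simp [he])] at hget
        exact Option.some.inj hget
      have hs : PySem.Str.startswith f p.1 = true := he ▸ startswith_take f L
      have hlen : PySem.Str.len p.1 = (L : Int) := by
        rw [he]
        show (((String.ofList (f.toList.take L)).toList.length : Nat) : Int) = (L : Int)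
        rw [String.toList_ofList, List.length_take, Nat.min_eq_left hL]
      have hstep : pidStep f (b, n) p = (some p.2, (L : Int)) := by
        rw [pidStep_take f (b, n) p hs (by rw [hlen]; exact hn), hlen]
      rw [List.foldl_cons, hstep, hv]
      exact foldA_stable f m (some v) (L : Int) htail
    · have hget' : PySem.Dict.get? (PySem.Dict.mk m) (String.ofList (f.toList.take L)) = some v := by
        rw [PySem.Dict.get?_mk_cons, if_neg (by simpa using he)] at hget
        exact hget
      by_cases hs : PySem.Str.startswith f p.1 = true
      · have hle : PySem.Str.len p.1 ≤ (L : Int) := hmax p List.mem_cons_self hs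
        have hne : PySem.Str.len p.1 ≠ (L : Int) := by
          intro hEq
          apply he
          have h2 : p.1.toList.length = L := by
            have : ((p.1.toList.length : Nat) : Int) = (L : Int) := hEq
            exact_mod_cast this
          calc p.1 = String.ofList p.1.toList := String.ofList_toList.symm
            _ = String.ofList (f.toList.take L) := by rw [key_eq_take f p.1 hs, h2]
        have hlt : PySem.Str.len p.1 < (L : Int) := lt_of_le_of_ne hle hne
        by_cases hbn : n < PySem.Str.len p.1
        · rw [List.foldl_cons, pidStep_take f (b, n) p hs hbn]
          exact ih (some p.2) (PySem.Str.len p.1) hlt hget' htail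
        · rw [List.foldl_cons, pidStep_skip f (b, n) p (fun hc => hbn hc.2)]
          exact ih b n hn hget' htail
      · rw [List.foldl_cons, pidStep_skip f (b, n) p (fun hc => hs hc.1)]
        exact ih b n hn hget' htail

theorem altSearch_none (m : List (String × String)) (fl : List Char) (j : Nat)
    (h : ∀ i, 1 ≤ i → i ≤ j → PySem.Dict.get? (PySem.Dict.mk m) (String.ofList (fl.take i)) = none) :
    altSearch m fl j = none := by
  induction j with
  | zero => rfl
  | succ j ih =>
    unfold altSearch
    rw [h (j + 1) (by omega) le_rfl]
    exact ih (fun i h1 h2 => h i h1 (by omega))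

theorem altSearch_hit (m : List (String × String)) (fl : List Char) (j L : Nat) (v : String)
    (h1 : 1 ≤ L) (hLj : L ≤ j)
    (hget : PySem.Dict.get? (PySem.Dict.mk m) (String.ofList (fl.take L)) = some v)
    (habove : ∀ i, L < i → i ≤ j → PySem.Dict.get? (PySem.Dict.mk m) (String.ofList (fl.take i)) = none) :
    altSearch m fl j = some v := by
  induction j with
  | zero => omega
  | succ j ih =>
    unfold altSearch
    by_cases hj : L = j + 1
    · subst hj; rw [hget]
    · rw [habove (j + 1) (by omega) le_rfl]
      exact ih (by omega) (fun i hi h2 => habove i hi (by omega))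

theorem format_len_pos (s : String) : 1 ≤ (format_work_dir s).toList.length := by
  unfold format_work_dir
  split
  · rename_i hs
    rw [PySem.Str.startswith_eq] at hs
    have hp := (PySem.Chars.startswith_iff _ _).mp hs
    have h1 : ("/" : String).toList.length ≤ s.toList.length := hp.length_le
    have h2 : ("/" : String).toList = ['/'] := rfl
    rw [h2] at h1
    simpa using h1
  · simp [String.toList_append]

-- ===== VERDICT (by name: the statement is the Claim_ definition above) =====
set_option maxHeartbeats 1000000 in
theorem project_id_for_work_dir_spec : Claim_equal_project_id_for_work_dir := by
  intro w m _
  unfold Spec_project_id_for_work_dir project_id_for_work_dir project_id_for_work_dir_alt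
  set f := format_work_dir (pyLstripSlash w) with hf
  cases h1 : PySem.Dict.get? (PySem.Dict.mk m) f with
  | some v => simp [h1]
  | none =>
    cases h2 : PySem.Dict.get? (PySem.Dict.mk m) w with
    | some v => simp [h1]
    | none =>
      simp only [h1, Option.none_or]
      -- goal: A's fold = B's descending prefix search; both find the longest prefix key
      set fl := f.toList with hfl
      have hfl1 : 1 ≤ fl.length := format_len_pos _
      obtain ⟨L, hLdef⟩ : ∃ L, L = Nat.findGreatest (fun i => probeB m fl i = true) (fl.length - 1) := ⟨_, rfl⟩
      have hLle : L ≤ fl.length - 1 := hLdef ▸ Nat.findGreatest_le _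
      have hmax : ∀ p ∈ m, PySem.Str.startswith f p.1 = true → PySem.Str.len p.1 ≤ (L : Int) := by
        intro p hp hs
        show ((p.1.toList.length : Nat) : Int) ≤ (L : Int)
        by_cases hk0 : p.1.toList.length = 0
        · rw [hk0]; exact_mod_cast Nat.zero_le L
        · have hkf : p.1.toList.length ≤ fl.length := by
            have h := congrArg List.length (key_eq_take f p.1 hs)
            rw [List.length_take] at h
            calc p.1.toList.length = min p.1.toList.length f.toList.length := h
              _ ≤ f.toList.length := Nat.min_le_right _ _
          have hkey : p.1 = String.ofList (fl.take p.1.toList.length) := by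
            calc p.1 = String.ofList p.1.toList := String.ofList_toList.symm
              _ = _ := congrArg String.ofList (key_eq_take f p.1 hs)
          have hsome : (PySem.Dict.get? (PySem.Dict.mk m) (String.ofList (fl.take p.1.toList.length))).isSome = true := by
            rw [getq_isSome_iff]
            exact ⟨p.2, by rw [← hkey]; simpa using hp⟩
          have hkne : p.1.toList.length ≠ fl.length := by
            intro hEq
            rw [hEq, List.take_length, hfl, String.ofList_toList] at hsome
            rw [h1] at hsome
            simp at hsome
          have hprobe : probeB m fl p.1.toList.length = true := by
            unfold probeB
            rw [Bool.and_eq_true, decide_eq_true_eq]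
            exact ⟨by omega, hsome⟩
          have hfg : p.1.toList.length ≤ Nat.findGreatest (fun i => probeB m fl i = true) (fl.length - 1) :=
            Nat.le_findGreatest (by omega) hprobe
          rw [← hLdef] at hfg
          exact_mod_cast hfg
      by_cases hL0 : L = 0
      · rw [foldA_stable f m none 0 (by rw [hL0] at hmax; simpa using hmax)]
        rw [altSearch_none m fl (min (fl.length - 1) (maxKeyLen m)) ?_]
        intro i hi1 hi2
        cases hg : PySem.Dict.get? (PySem.Dict.mk m) (String.ofList (fl.take i)) with
        | none => rfl
        | some u =>
          have hprobe : probeB m fl i = true := by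
            unfold probeB
            rw [Bool.and_eq_true, decide_eq_true_eq]
            exact ⟨hi1, by rw [hg]; rfl⟩
          have hfg : i ≤ Nat.findGreatest (fun i => probeB m fl i = true) (fl.length - 1) :=
            Nat.le_findGreatest (by omega) hprobe
          rw [← hLdef] at hfg
          omega
      · have hex : ∃ i, 0 < i ∧ i ≤ fl.length - 1 ∧ probeB m fl i = true := by
          by_contra hno
          push Not at hno
          apply hL0
          rw [hLdef]
          exact Nat.findGreatest_eq_zero_iff.mpr (fun i hi1 hi2 hPi => (hno i hi1 hi2) hPi)
        obtain ⟨i, hi1, hi2, hPi⟩ := hex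
        have hPL : probeB m fl L = true := by
          rw [hLdef]; exact Nat.findGreatest_spec (P := fun i => probeB m fl i = true) hi2 hPi
        rw [probeB, Bool.and_eq_true, decide_eq_true_eq] at hPL
        obtain ⟨hL1, hLsome⟩ := hPL
        obtain ⟨v, hv⟩ := Option.isSome_iff_exists.mp hLsome
        rw [foldA_hit f m none 0 L v (by exact_mod_cast Nat.pos_of_ne_zero hL0)
              (by have hfe : fl.length = f.toList.length := congrArg List.length hfl
                  omega) hv hmax]
        have hLmk : L ≤ maxKeyLen m := by
          obtain ⟨v', hv'⟩ := (getq_isSome_iff m _).mp hLsome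
          have hle := len_le_maxKeyLen m (String.ofList (fl.take L), v') hv'
          rw [String.toList_ofList, List.length_take] at hle
          omega
        rw [altSearch_hit m fl (min (fl.length - 1) (maxKeyLen m)) L v hL1 (by omega) hv ?_]
        intro i hi hile
        cases hg : PySem.Dict.get? (PySem.Dict.mk m) (String.ofList (fl.take i)) with
        | none => rfl
        | some u =>
          have hprobe : probeB m fl i = true := by
            unfold probeB
            rw [Bool.and_eq_true, decide_eq_true_eq]
            exact ⟨by omega, by rw [hg]; rfl⟩
          exact absurd hprobe (Nat.findGreatest_is_greatest (hLdef ▸ hi) (by omega))
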